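-- pv_equiv track=rewrite | github.com/Enjef/Algo | 2100 - 2199/2148 - Count Elements With Strictly Smaller and Greater Elements/2148 - Count Elements With Strictly Smaller and Greater Elements.py | countElements_best_speed
-- ===== SOURCE A (Python) =====
-- from typing import List
--
-- def countElements_best_speed(nums: List[int]) -> int:
--     min_num = min(nums)
--     max_num = max(nums)
--     output = 0
--     for num in nums:
--         if min_num < num < max_num:
--             output += 1
--     return output
-- ===== SOURCE B (Python) =====
-- from typing import List
--
-- def countElements_best_speed(nums: List[int]) -> int:
--     s = sorted(nums)
--     if not s or s[0] == s[-1]: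
--         return 0
--     t = s
--     while t[0] == s[0]:
--         t = t[1:]
--     u = s[::-1]
--     while u[0] == s[-1]:
--         u = u[1:]
--     return len(t) + len(u) - len(s)
-- ===== Notes on version B (the rewrite author's own statement) =====
-- stated objective: alternative
-- what changed: B sorts the list and strips the run of minima from the front and the run of maxima from the front of the reversal (two dropWhile loops on the sorted list), instead of A's single comparison loop against min() and max().
import Mathlib
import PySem

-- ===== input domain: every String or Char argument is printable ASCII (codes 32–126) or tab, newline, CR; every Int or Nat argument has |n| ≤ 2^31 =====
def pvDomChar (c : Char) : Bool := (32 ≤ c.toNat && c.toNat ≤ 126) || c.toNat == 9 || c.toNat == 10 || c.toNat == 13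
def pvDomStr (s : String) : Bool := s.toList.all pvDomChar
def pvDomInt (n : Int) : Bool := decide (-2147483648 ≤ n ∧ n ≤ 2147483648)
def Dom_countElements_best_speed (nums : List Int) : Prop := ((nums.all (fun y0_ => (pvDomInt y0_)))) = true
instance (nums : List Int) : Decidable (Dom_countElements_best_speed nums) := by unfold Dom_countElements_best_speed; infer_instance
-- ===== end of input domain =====

-- B sorts the list and strips the equal-to-min prefix and equal-to-max prefix of the reversal (sort + dropWhile), instead of A's comparison loop against min()/max(): alternative algorithm.


-- ===== PORT A =====
-- min(nums)/max(nums) raise ValueError on [], hence Pre_ below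
def countElements_best_speed (nums : List Int) : Int :=
  match PySem.List.min? nums (fun x => x), PySem.List.max? nums (fun x => x) with
  | some min_num, some max_num =>
      nums.foldl (fun output num => if min_num < num ∧ num < max_num then output + 1 else output) 0
  | _, _ => 0

-- ===== PORT B =====
-- 'while t[0] == v: t = t[1:]' — under B's guard (s nonempty, s[0] ≠ s[-1]) the list
-- never empties before an element ≠ v appears, so the [] case is unreachable there
def pvDropEq (v : Int) : List Int → List Int
  | [] => []
  | a :: t => if a = v then pvDropEq v t else a :: t

-- s[0] / s[-1] ported as getD; exact because the guard '¬(s = [] ∨ …)' short-circuits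
-- exactly as Python's 'not s or …' does, so they are only read on nonempty s
def countElements_best_speed_alt (nums : List Int) : Int :=
  let s := PySem.List.sorted nums (fun x => x) false
  if s = [] ∨ s.getD 0 0 = s.getD (s.length - 1) 0 then 0
  else
    let t := pvDropEq (s.getD 0 0) s
    let u := pvDropEq (s.getD (s.length - 1) 0) s.reverse
    (t.length : Int) + (u.length : Int) - (s.length : Int)

-- ===== PRECONDITION & SPEC =====
-- Pre_ excludes only the empty list, on which Python's min() raises ValueError
def Pre_countElements_best_speed (nums : List Int) : Prop := nums ≠ []
instance (nums : List Int) : Decidable (Pre_countElements_best_speed nums) := by unfold Pre_countElements_best_speed; infer_instance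
def pvWitness_countElements_best_speed : List Int := [1, 2, 3]
def Spec_countElements_best_speed (nums : List Int) (out : Int) : Prop := out = countElements_best_speed_alt nums
instance (nums : List Int) (out : Int) : Decidable (Spec_countElements_best_speed nums out) := by unfold Spec_countElements_best_speed; infer_instance

-- ===== CLAIM =====
def Claim_equal_countElements_best_speed : Prop := ∀ (nums : List Int), Dom_countElements_best_speed nums → Pre_countElements_best_speed nums → Spec_countElements_best_speed nums (countElements_best_speed nums)

-- ===== LEMMAS AND PROOFS =====

-- every element is min, max, or strictly between: the three counts partition the list
theorem pv_tri (mn mx : Int) (h : mn < mx) (l : List Int) (hb : ∀ x ∈ l, mn ≤ x ∧ x ≤ mx) :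
    l.countP (fun x => decide (mn < x ∧ x < mx)) + l.count mn + l.count mx = l.length := by
  induction l with
  | nil => simp
  | cons a t ih =>
    have ha := hb a (by simp)
    have ht : ∀ x ∈ t, mn ≤ x ∧ x ≤ mx := fun x hx => hb x (by simp [hx])
    have iht := ih ht
    simp only [List.countP_cons, List.count_cons, List.length_cons]
    set k := t.countP (fun x => decide (mn < x ∧ x < mx)) with hk
    rcases lt_or_eq_of_le ha.1 with h1 | h1
    · rcases lt_or_eq_of_le ha.2 with h2 | h2
      · have e1 : (decide (mn < a ∧ a < mx)) = true := by simp [h1, h2]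
        have e2 : (a == mn) = false := by simp; omega
        have e3 : (a == mx) = false := by simp; omega
        rw [e1, e2, e3]; simp; omega
      · have e1 : (decide (mn < a ∧ a < mx)) = false := by simp; omega
        have e2 : (a == mn) = false := by simp; omega
        have e3 : (a == mx) = true := by simp [h2]
        rw [e1, e2, e3]; simp; omega
    · have e1 : (decide (mn < a ∧ a < mx)) = false := by simp; omega
      have e2 : (a == mn) = true := by simp [h1.symm]
      have e3 : (a == mx) = false := by simp; omega
      rw [e1, e2, e3]; simp; omega

-- stripping the v-prefix of an ascending list for which v is a lower bound removes
-- exactly the occurrences of v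
theorem pv_dropEq_len (v : Int) (l : List Int)
    (hord : l.Pairwise (· ≤ ·)) (hlb : ∀ x ∈ l, v ≤ x) :
    (pvDropEq v l).length + l.count v = l.length := by
  induction l with
  | nil => simp [pvDropEq]
  | cons a t ih =>
    rcases List.pairwise_cons.mp hord with ⟨hat, hpt⟩
    have hva := hlb a (by simp)
    by_cases hav : a = v
    · have := ih hpt (fun x hx => hlb x (by simp [hx]))
      simp [pvDropEq, hav]
      omega
    · have hcnt : t.count v = 0 := by
        apply List.count_eq_zero.mpr
        intro hv
        have := hat v hv
        omega
      have e2 : (a == v) = false := by simp [hav]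
      simp [pvDropEq, hav, hcnt]

-- the descending twin, for the reversed list and the maximum
theorem pv_dropEq_len_rev (v : Int) (l : List Int)
    (hord : l.Pairwise (fun a b => b ≤ a)) (hub : ∀ x ∈ l, x ≤ v) :
    (pvDropEq v l).length + l.count v = l.length := by
  induction l with
  | nil => simp [pvDropEq]
  | cons a t ih =>
    rcases List.pairwise_cons.mp hord with ⟨hat, hpt⟩
    have hva := hub a (by simp)
    by_cases hav : a = v
    · have := ih hpt (fun x hx => hub x (by simp [hx]))
      simp [pvDropEq, hav]
      omega
    · have hcnt : t.count v = 0 := by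
        apply List.count_eq_zero.mpr
        intro hv
        have := hat v hv
        omega
      have e2 : (a == v) = false := by simp [hav]
      simp [pvDropEq, hav, hcnt]

-- ===== VERDICT =====
theorem countElements_best_speed_spec : Claim_equal_countElements_best_speed := by
  intro nums _ hpre
  unfold Spec_countElements_best_speed
  cases hmn : PySem.List.min? nums (fun x => x) with
  | none => exact absurd ((PySem.List.min?_eq_none_iff nums (fun x => x)).mp hmn) hpre
  | some mn =>
    cases hmx : PySem.List.max? nums (fun x => x) with
    | none => exact absurd ((PySem.List.max?_eq_none_iff nums (fun x => x)).mp hmx) hpre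
    | some mx =>
      have hmin : ∀ y ∈ nums, mn ≤ y := PySem.List.min?_isMin hmn
      have hmax : ∀ y ∈ nums, y ≤ mx := PySem.List.max?_isMax hmx
      have hle : mn ≤ mx := hmax mn (PySem.List.min?_mem hmn)
      set s := PySem.List.sorted nums (fun x => x) false with hs
      have hperm : s.Perm nums := PySem.List.sorted_perm nums (fun x => x) false
      have hpair : s.Pairwise (· ≤ ·) := PySem.List.sorted_pairwise nums (fun x => x)
      have hsne : s ≠ [] := fun h => hpre ((h ▸ hperm).symm.eq_nil)
      have hlen : s.length = nums.length := hperm.length_eq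
      have hspos : 0 < s.length := List.length_pos_iff.mpr hsne
      obtain ⟨a, t, hst⟩ := List.exists_cons_of_ne_nil hsne
      have hmem : ∀ y, y ∈ s ↔ y ∈ nums := fun y => hperm.mem_iff
      have hhead : s.getD 0 0 = mn := by
        have h1 : a ∈ nums := (hmem a).mp (hst ▸ List.mem_cons_self)
        have h2 : ∀ y ∈ nums, a ≤ y :=
          PySem.List.key_head_sorted_le nums (fun x => x) (hs.symm.trans hst)
        have := hmin a h1
        have := h2 mn (PySem.List.min?_mem hmn)
        simp [hst]; omega
      have hub : ∀ y ∈ s, y ≤ s.getD (s.length - 1) 0 := by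
        intro y hy
        obtain ⟨i, hi, hiy⟩ := List.getElem_of_mem hy
        have hq : s.length - 1 < s.length := by omega
        have := PySem.List.sorted_id_getElem_mono (xs := nums) (p := i) (q := s.length - 1)
          (by omega) (by rw [← hs]; omega)
        rw [List.getD_eq_getElem?_getD, List.getElem?_eq_getElem hq]
        simp only [← hs] at this ⊢
        rw [← hiy]
        exact this
      have hlast : s.getD (s.length - 1) 0 = mx := by
        have hm : s.getD (s.length - 1) 0 ∈ s := by
          have hq : s.length - 1 < s.length := by omega
          rw [List.getD_eq_getElem?_getD, List.getElem?_eq_getElem hq]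
          exact List.getElem_mem hq
        have h1 := hmax _ ((hmem _).mp hm)
        have h2 := hub mx ((hmem mx).mpr (PySem.List.max?_mem hmx))
        omega
      have hA : countElements_best_speed nums
          = (nums.countP (fun x => decide (mn < x ∧ x < mx)) : Int) := by
        unfold countElements_best_speed
        rw [hmn, hmx]
        simp only
        rw [PySem.List.foldl_ite_add_one]
        omega
      rw [hA]
      rcases lt_or_eq_of_le hle with hlt | heq
      · -- min < max: guard is false, both sides equal len - count mn - count mx
        have hg : ¬ (s = [] ∨ mn = mx) :=
          fun h => h.elim hsne (fun h2 => (ne_of_lt hlt) h2)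
        have hB : countElements_best_speed_alt nums
            = ((pvDropEq mn s).length : Int) + ((pvDropEq mx s.reverse).length : Int)
              - (s.length : Int) := by
          simp only [countElements_best_speed_alt, ← hs]
          rw [hhead, hlast, if_neg hg]
        rw [hB]
        have e1 : (pvDropEq mn s).length + s.count mn = s.length :=
          pv_dropEq_len mn s hpair (fun x hx => hmin x ((hmem x).mp hx))
        have e2 : (pvDropEq mx s.reverse).length + s.reverse.count mx = s.reverse.length := by
          apply pv_dropEq_len_rev mx s.reverse
          · rw [List.pairwise_reverse]
            exact hpair
          · intro x hx
            exact hmax x ((hmem x).mp (List.mem_reverse.mp hx))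
        have e3 := pv_tri mn mx hlt nums (fun x hx => ⟨hmin x hx, hmax x hx⟩)
        have c1 : s.count mn = nums.count mn := hperm.count_eq mn
        have c2 : s.reverse.count mx = nums.count mx := by
          rw [List.count_reverse]; exact hperm.count_eq mx
        simp only [List.length_reverse] at e2
        omega
      · -- min = max: guard true, and no element is strictly between
        have hB : countElements_best_speed_alt nums = 0 := by
          simp only [countElements_best_speed_alt, ← hs]
          rw [hhead, hlast, if_pos (Or.inr heq)]
        rw [hB]
        have : nums.countP (fun x => decide (mn < x ∧ x < mx)) = 0 := by
          apply List.countP_eq_zero.mpr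
          intro x _
          simp only [decide_eq_true_eq]
          omega
        omega
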